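-- pv_equiv track=rewrite | github.com/liz1czapla3955/csvwrangler | csvwrangler/flattener.py | fill_down_rows
-- ===== SOURCE A (Python) =====
-- from typing import List, Dict, Optional
--
-- def fill_down_rows(
--     rows: List[Dict[str, str]],
--     columns: Optional[List[str]] = None,
-- ) -> List[Dict[str, str]]:
--     """Fill down empty cells in specified columns using the last non-empty value.
--
--     Args:
--         rows: List of row dicts.
--         columns: Column names to fill down. If None, fill all columns.
--
--     Returns:
--         New list of row dicts with empty cells filled.
--     """
--     if not rows:
--         return []
--
--     target_cols = columns if columns is not None else list(rows[0].keys())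
--     last_seen: Dict[str, str] = {col: "" for col in target_cols}
--     result = []
--
--     for row in rows:
--         new_row = dict(row)
--         for col in target_cols:
--             if col not in new_row:
--                 continue
--             if new_row[col].strip() == "":
--                 new_row[col] = last_seen.get(col, "")
--             else:
--                 last_seen[col] = new_row[col]
--         result.append(new_row)
--
--     return result
-- ===== SOURCE B (Python) =====
-- def fill_down_rows(rows, columns=None):
--     """Per-cell functional rewrite: each empty cell is computed directly by
--     scanning earlier rows backwards for the last non-empty value, instead of
--     carrying a last_seen state dict through a row-major loop."""
--     if not rows:
--         return []
--     target = columns if columns is not None else list(rows[0].keys())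
--     tset = set(target)
--
--     def fill_value(i, col):
--         for j in range(i - 1, -1, -1):
--             v = rows[j].get(col)
--             if v is not None and v.strip() != "":
--                 return v
--         return ""
--
--     return [
--         {c: (fill_value(i, c) if c in tset and v.strip() == "" else v)
--          for c, v in row.items()}
--         for i, row in enumerate(rows)
--     ]
-- ===== Notes on version B (the rewrite author's own statement) =====
-- stated objective: alternative
-- what changed: Replaces A's stateful row-major scan that threads a last_seen dict through nested loops with a pure per-cell comprehension that computes each empty cell directly by searching earlier rows backwards for the last non-empty value.
import Mathlib
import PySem

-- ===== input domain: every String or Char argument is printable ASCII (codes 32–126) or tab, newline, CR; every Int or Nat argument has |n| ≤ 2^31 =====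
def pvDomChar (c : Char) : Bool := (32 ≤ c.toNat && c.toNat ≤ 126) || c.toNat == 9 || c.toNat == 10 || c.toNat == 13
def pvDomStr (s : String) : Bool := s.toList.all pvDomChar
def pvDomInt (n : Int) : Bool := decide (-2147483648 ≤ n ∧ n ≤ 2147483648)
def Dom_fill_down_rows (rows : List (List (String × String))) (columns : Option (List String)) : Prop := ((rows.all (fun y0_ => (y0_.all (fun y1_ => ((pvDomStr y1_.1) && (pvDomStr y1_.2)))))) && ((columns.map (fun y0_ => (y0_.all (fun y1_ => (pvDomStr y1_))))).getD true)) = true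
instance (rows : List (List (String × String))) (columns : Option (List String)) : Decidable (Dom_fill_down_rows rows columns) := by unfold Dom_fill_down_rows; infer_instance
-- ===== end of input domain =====

-- B replaces A's row-major scan carrying a last_seen dict by a pure per-cell rewrite that
-- searches earlier rows backwards for the last non-empty value (objective: alternative).

abbrev SDict := PySem.Dict String String

-- ===== PORT A =====
-- inner loop body: `for col in target_cols: if col not in new_row: continue; …`
def aInner (p : SDict × SDict) (col : String) : SDict × SDict :=
  if p.1.contains col then
    if PySem.Str.strip (p.1.getD col "") == "" then
      (p.1.insert col (p.2.getD col ""), p.2)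
    else
      (p.1, p.2.insert col (p.1.getD col ""))
  else p

-- one iteration of `for row in rows:` (state: result so far, last_seen)
def aStep (target_cols : List String) (acc : List SDict × SDict) (row : List (String × String)) :
    List SDict × SDict :=
  let inner := target_cols.foldl aInner (PySem.Dict.ofList row, acc.2)
  (acc.1 ++ [inner.1], inner.2)

def fill_down_rows (rows : List (List (String × String))) (columns : Option (List String)) :
    List (List (String × String)) :=
  match rows with
  | [] => []
  | r0 :: _ =>
    let target_cols : List String :=
      match columns with
      | some cs => cs
      | none => (PySem.Dict.ofList r0).keys
    let last_seen : SDict := target_cols.foldl (fun d c => d.insert c "") PySem.Dict.empty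
    ((rows.foldl (aStep target_cols) ([], last_seen)).1).map (fun d => d.items)

-- ===== PORT B =====
-- fill_value: scan earlier rows backwards (revPrev is the already-seen rows, nearest first)
def fillSearch (revPrev : List SDict) (col : String) : String :=
  match revPrev with
  | [] => ""
  | d :: rest =>
    match d.get? col with
    | some v => if PySem.Str.strip v == "" then fillSearch rest col else v
    | none => fillSearch rest col

-- the comprehension over enumerate(rows), carrying the reversed prefix of seen rows
def bRows (tset : PySem.Set String) (ds : List SDict) (revPrev : List SDict) :
    List (List (String × String)) :=
  match ds with
  | [] => []
  | d :: rest =>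
    (d.items.map (fun cv =>
        if tset.contains cv.1 && (PySem.Str.strip cv.2 == "") then
          (cv.1, fillSearch revPrev cv.1)
        else cv))
      :: bRows tset rest (d :: revPrev)

def fill_down_rows_alt (rows : List (List (String × String))) (columns : Option (List String)) :
    List (List (String × String)) :=
  match rows with
  | [] => []
  | r0 :: _ =>
    let target : List String :=
      match columns with
      | some cs => cs
      | none => (PySem.Dict.ofList r0).keys
    let tset : PySem.Set String := PySem.Set.ofList target
    bRows tset (rows.map (fun r => PySem.Dict.ofList r)) []

-- ===== PRECONDITION & SPEC =====
def Spec_fill_down_rows (rows : List (List (String × String))) (columns : Option (List String)) (out : List (List (String × String))) : Prop := out = fill_down_rows_alt rows columns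
instance (rows : List (List (String × String))) (columns : Option (List String)) (out : List (List (String × String))) : Decidable (Spec_fill_down_rows rows columns out) := by unfold Spec_fill_down_rows; infer_instance

-- ===== CLAIM (what is proved, stated in full; the proofs are below) =====
def Claim_equal_fill_down_rows : Prop := ∀ (rows : List (List (String × String))) (columns : Option (List String)), Dom_fill_down_rows rows columns → Spec_fill_down_rows rows columns (fill_down_rows rows columns)

-- ===== LEMMAS AND PROOFS =====

-- the value A's last_seen holds for column c after the rows `pref` have been processed
def lastVal (pref : List SDict) (c : String) : String :=
  pref.foldl (fun acc d =>
    match d.get? c with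
    | some v => if PySem.Str.strip v = "" then acc else v
    | none => acc) ""

-- how one processed row looks: cells of target columns whose value strips to "" get f applied
def fillItem (ps : List String) (f : String → String) (cv : String × String) : String × String :=
  if cv.1 ∈ ps ∧ PySem.Str.strip cv.2 = "" then (cv.1, f cv.1) else cv

-- last_seen after the columns ps of the current row (original dict nr₀, incoming last_seen ls₀)
def lsSpec (ps : List String) (nr₀ ls₀ : SDict) (c : String) : String :=
  match nr₀.get? c with
  | some v => if c ∈ ps ∧ ¬ PySem.Str.strip v = "" then v else ls₀.getD c ""
  | none => ls₀.getD c ""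

lemma fillItem_fst (ps : List String) (f : String → String) (cv : String × String) :
    (fillItem ps f cv).1 = cv.1 := by
  unfold fillItem; split <;> rfl

lemma map_fillItem_nil (f : String → String) (l : List (String × String)) :
    l.map (fillItem [] f) = l := by
  have h : ∀ cv ∈ l, fillItem [] f cv = cv := by
    intro cv _; simp [fillItem]
  simpa using List.map_congr_left h

lemma lastVal_append (pref : List SDict) (d : SDict) (c : String) :
    lastVal (pref ++ [d]) c =
      match d.get? c with
      | some v => if PySem.Str.strip v = "" then lastVal pref c else v
      | none => lastVal pref c := by
  unfold lastVal
  rw [List.foldl_append]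
  rfl

lemma fillSearch_eq (rev : List SDict) (c : String) :
    fillSearch rev c = lastVal rev.reverse c := by
  induction rev with
  | nil => rfl
  | cons d rest ih =>
    rw [List.reverse_cons, lastVal_append]
    cases h : d.get? c with
    | none => simp [fillSearch, h, ih]
    | some v =>
      by_cases hv : PySem.Str.strip v = "" <;> simp [fillSearch, h, hv, ih]

lemma inner_step (nr₀ ls₀ : SDict) (h₀ : nr₀.keys.Nodup)
    (ps : List String) (c₀ : String) (nr ls : SDict)
    (hk : nr.keys = nr₀.keys)
    (hit : nr.items = nr₀.items.map (fillItem ps (fun c => ls₀.getD c "")))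
    (hg : ∀ c, nr.get? c = (nr₀.get? c).map
        (fun v => if c ∈ ps ∧ PySem.Str.strip v = "" then ls₀.getD c "" else v))
    (hl : ∀ c, ls.getD c "" = lsSpec ps nr₀ ls₀ c) :
    ((aInner (nr, ls) c₀).1.keys = nr₀.keys
     ∧ (aInner (nr, ls) c₀).1.items
         = nr₀.items.map (fillItem (ps ++ [c₀]) (fun c => ls₀.getD c ""))
     ∧ (∀ c, (aInner (nr, ls) c₀).1.get? c = (nr₀.get? c).map
         (fun v => if c ∈ ps ++ [c₀] ∧ PySem.Str.strip v = "" then ls₀.getD c "" else v))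
     ∧ (∀ c, (aInner (nr, ls) c₀).2.getD c "" = lsSpec (ps ++ [c₀]) nr₀ ls₀ c)) := by
  by_cases hc : nr.contains c₀ = true
  · -- column present in the row
    have hmem : c₀ ∈ nr₀.keys := hk ▸ ((PySem.Dict.contains_iff_mem_keys _ _).mp hc)
    obtain ⟨v₀, hv₀⟩ : ∃ v, nr₀.get? c₀ = some v := by
      cases h : nr₀.get? c₀ with
      | some v => exact ⟨v, rfl⟩
      | none => exact absurd hmem ((PySem.Dict.get?_eq_none_iff_not_mem_keys _ _).mp h)
    have hw : nr.getD c₀ ""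
        = (if c₀ ∈ ps ∧ PySem.Str.strip v₀ = "" then ls₀.getD c₀ "" else v₀) := by
      rw [PySem.Dict.getD_eq_get?_getD, hg c₀, hv₀]
      rfl
    have hcv2 : ∀ cv : String × String, cv ∈ nr₀.items → cv.1 = c₀ → cv.2 = v₀ := by
      intro cv hcv he
      have h1 : nr₀.get? cv.1 = some cv.2 := PySem.Dict.get?_of_mem_items nr₀ hcv h₀
      rw [he, hv₀] at h1
      exact (Option.some_injective _ h1).symm
    by_cases hstrip : PySem.Str.strip (nr.getD c₀ "") = ""
    · -- empty cell: fill it from last_seen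
      have hA : aInner (nr, ls) c₀ = (nr.insert c₀ (ls.getD c₀ ""), ls) := by
        simp [aInner, hc, hstrip]
      have Kv : PySem.Str.strip v₀ = "" := by
        by_cases hv : PySem.Str.strip v₀ = ""
        · exact hv
        · exfalso
          have hwv : nr.getD c₀ "" = v₀ := by rw [hw]; simp [hv]
          rw [hwv] at hstrip
          exact hv hstrip
      have hu : ls.getD c₀ "" = ls₀.getD c₀ "" := by
        rw [hl c₀]; unfold lsSpec; rw [hv₀]; simp [Kv]
      rw [hA]
      refine ⟨?_, ?_, ?_, ?_⟩
      · rw [PySem.Dict.keys_insert_of_contains _ _ hc, hk]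
      · rw [PySem.Dict.items_insert_of_contains _ _ hc, hit, List.map_map]
        refine List.map_congr_left ?_
        intro cv hcv
        by_cases he : cv.1 = c₀
        · have h2 := hcv2 cv hcv he
          by_cases hps : c₀ ∈ ps <;>
            simp [fillItem, he, h2, Kv, hu, hps]
        · simp only [Function.comp_apply]
          rw [if_neg (by simp [fillItem_fst, he])]
          simp [fillItem, he]
      · intro c
        rw [PySem.Dict.get?_insert]
        by_cases he : c = c₀
        · rw [if_pos he, he, hv₀]
          simp [Kv, hu]
        · rw [if_neg he, hg c]
          cases h : nr₀.get? c <;> simp [he]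
      · intro c
        rw [hl c]
        unfold lsSpec
        by_cases he : c = c₀
        · rw [he, hv₀]
          simp [Kv]
        · cases h : nr₀.get? c <;> simp [he]
    · -- non-empty cell: record it in last_seen
      have hA : aInner (nr, ls) c₀ = (nr, ls.insert c₀ (nr.getD c₀ "")) := by
        simp [aInner, hc, beq_iff_eq, hstrip]
      have hfacts : (PySem.Str.strip v₀ = "" → c₀ ∈ ps ∧ nr.getD c₀ "" = ls₀.getD c₀ "")
          ∧ (¬ PySem.Str.strip v₀ = "" → nr.getD c₀ "" = v₀) := by
        constructor
        · intro hv
          by_cases hps : c₀ ∈ ps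
          · exact ⟨hps, by rw [hw]; simp [hps, hv]⟩
          · exfalso
            have hwv : nr.getD c₀ "" = v₀ := by rw [hw]; simp [hps]
            rw [hwv] at hstrip
            exact hstrip hv
        · intro hv
          rw [hw]; simp [hv]
      rw [hA]
      refine ⟨hk, ?_, ?_, ?_⟩
      · rw [hit]
        refine List.map_congr_left ?_
        intro cv hcv
        by_cases he : cv.1 = c₀
        · have h2 := hcv2 cv hcv he
          by_cases hv : PySem.Str.strip v₀ = ""
          · obtain ⟨hps, -⟩ := hfacts.1 hv
            simp [fillItem, he, h2, hv, hps]
          · simp [fillItem, he, h2, hv]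
        · simp [fillItem, he]
      · intro c
        by_cases he : c = c₀
        · rw [he, hg c₀, hv₀]
          by_cases hv : PySem.Str.strip v₀ = ""
          · obtain ⟨hps, -⟩ := hfacts.1 hv
            simp [hv, hps]
          · simp [hv]
        · rw [hg c]
          cases h : nr₀.get? c <;> simp [he]
      · intro c
        rw [PySem.Dict.getD_insert]
        by_cases he : c = c₀
        · rw [if_pos he, he]
          unfold lsSpec
          rw [hv₀]
          by_cases hv : PySem.Str.strip v₀ = ""
          · obtain ⟨-, hval⟩ := hfacts.1 hv
            simp [hv, hval]
          · simp [hv, hfacts.2 hv]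
        · rw [if_neg he, hl c]
          unfold lsSpec
          cases h : nr₀.get? c <;> simp [he]
  · -- column absent from the row: skipped
    have hA : aInner (nr, ls) c₀ = (nr, ls) := by
      simp [aInner, hc]
    have hmem : c₀ ∉ nr₀.keys := by
      rw [← hk]
      intro hm
      exact hc ((PySem.Dict.contains_iff_mem_keys _ _).mpr hm)
    have hnone : nr₀.get? c₀ = none := (PySem.Dict.get?_eq_none_iff_not_mem_keys _ _).mpr hmem
    rw [hA]
    refine ⟨hk, ?_, ?_, ?_⟩
    · rw [hit]
      refine List.map_congr_left ?_
      intro cv hcv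
      have he : cv.1 ≠ c₀ := fun h =>
        hmem (h ▸ PySem.Dict.mem_keys_of_mem_items nr₀ hcv)
      simp [fillItem, he]
    · intro c
      rw [hg c]
      cases h : nr₀.get? c with
      | none => rfl
      | some v =>
        have he : c ≠ c₀ := fun e => by rw [e, hnone] at h; cases h
        simp [he]
    · intro c
      rw [hl c]
      unfold lsSpec
      cases h : nr₀.get? c with
      | none => simp
      | some v =>
        have he : c ≠ c₀ := fun e => by rw [e, hnone] at h; cases h
        simp [he]

lemma inner_fold (nr₀ : SDict) (h₀ : nr₀.keys.Nodup) (ls₀ : SDict) :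
    ∀ (cs ps : List String) (nr ls : SDict),
    nr.keys = nr₀.keys →
    nr.items = nr₀.items.map (fillItem ps (fun c => ls₀.getD c "")) →
    (∀ c, nr.get? c = (nr₀.get? c).map
        (fun v => if c ∈ ps ∧ PySem.Str.strip v = "" then ls₀.getD c "" else v)) →
    (∀ c, ls.getD c "" = lsSpec ps nr₀ ls₀ c) →
    ((cs.foldl aInner (nr, ls)).1.items
        = nr₀.items.map (fillItem (ps ++ cs) (fun c => ls₀.getD c ""))
      ∧ ∀ c, (cs.foldl aInner (nr, ls)).2.getD c "" = lsSpec (ps ++ cs) nr₀ ls₀ c) := by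
  intro cs
  induction cs with
  | nil =>
    intro ps nr ls _ hit _ hl
    simpa using ⟨hit, hl⟩
  | cons c₀ cs' ih =>
    intro ps nr ls hk hit hg hl
    obtain ⟨k', it', g', l'⟩ := inner_step nr₀ ls₀ h₀ ps c₀ nr ls hk hit hg hl
    have hfold : (c₀ :: cs').foldl aInner (nr, ls)
        = cs'.foldl aInner ((aInner (nr, ls) c₀).1, (aInner (nr, ls) c₀).2) := by
      rw [List.foldl_cons]
    have := ih (ps ++ [c₀]) (aInner (nr, ls) c₀).1 (aInner (nr, ls) c₀).2 k' it' g' l'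
    rw [hfold]
    simpa [List.append_assoc] using this

lemma outer_fold (target : List String) :
    ∀ (ds : List (List (String × String))) (pref : List SDict) (resA : List SDict) (ls : SDict),
    (∀ c ∈ target, ls.getD c "" = lastVal pref c) →
    ((ds.foldl (aStep target) (resA, ls)).1).map (fun d => d.items)
      = resA.map (fun d => d.items)
        ++ bRows (PySem.Set.ofList target) (ds.map (fun r => PySem.Dict.ofList r)) pref.reverse := by
  intro ds
  induction ds with
  | nil =>
    intro pref resA ls _
    simp [bRows]
  | cons row rest ih =>
    intro pref resA ls hls
    have h₀ : (PySem.Dict.ofList row : SDict).keys.Nodup := PySem.Dict.nodup_keys_ofList row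
    obtain ⟨hit', hl'⟩ :=
      inner_fold (PySem.Dict.ofList row) h₀ ls target [] (PySem.Dict.ofList row) ls rfl
        ((map_fillItem_nil _ _).symm)
        (by intro c; cases h : (PySem.Dict.ofList row : SDict).get? c <;> simp)
        (by
          intro c; unfold lsSpec
          cases h : (PySem.Dict.ofList row : SDict).get? c <;> simp)
    simp only [List.nil_append] at hit' hl'
    have hls' : ∀ c ∈ target,
        (target.foldl aInner ((PySem.Dict.ofList row : SDict), ls)).2.getD c ""
          = lastVal (pref ++ [PySem.Dict.ofList row]) c := by
      intro c hc
      rw [hl' c, lastVal_append]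
      unfold lsSpec
      cases h : (PySem.Dict.ofList row : SDict).get? c with
      | none => simp [hls c hc]
      | some v =>
        by_cases hv : PySem.Str.strip v = "" <;> simp [hv, hc, hls c hc]
    have hrow : ∀ cv : String × String,
        fillItem target (fun c => ls.getD c "") cv
          = (if (PySem.Set.ofList target).contains cv.1 && (PySem.Str.strip cv.2 == "") then
              (cv.1, fillSearch pref.reverse cv.1)
            else cv) := by
      intro cv
      unfold fillItem
      by_cases hm : cv.1 ∈ target
      · by_cases hv : PySem.Str.strip cv.2 = ""
        · simp [PySem.Set.contains, PySem.Set.mem_ofList, hm, hv,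
            fillSearch_eq, List.reverse_reverse, hls cv.1 hm]
        · simp [PySem.Set.contains, PySem.Set.mem_ofList, hm, hv]
      · simp [PySem.Set.contains, PySem.Set.mem_ofList, hm]
    have hhead : (target.foldl aInner ((PySem.Dict.ofList row : SDict), ls)).1.items
        = (PySem.Dict.ofList row : SDict).items.map
            (fun cv =>
              if (PySem.Set.ofList target).contains cv.1 && (PySem.Str.strip cv.2 == "") then
                (cv.1, fillSearch pref.reverse cv.1)
              else cv) := by
      rw [hit']
      exact List.map_congr_left (fun cv _ => hrow cv)
    have hstep : (row :: rest).foldl (aStep target) (resA, ls)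
        = rest.foldl (aStep target)
            (resA ++ [(target.foldl aInner ((PySem.Dict.ofList row : SDict), ls)).1],
             (target.foldl aInner ((PySem.Dict.ofList row : SDict), ls)).2) := by
      rw [List.foldl_cons]
      rfl
    rw [hstep, ih (pref ++ [PySem.Dict.ofList row]) _ _ hls']
    simp only [bRows, List.map_append, List.map_cons, List.map_nil, List.reverse_append,
      List.reverse_cons, List.reverse_nil, List.nil_append, List.cons_append,
      List.append_assoc]
    rw [hhead]

lemma init_aux : ∀ (target : List String) (d : SDict),
    (∀ c, d.getD c "" = "") →
    ∀ c, (target.foldl (fun d c => d.insert c "") d).getD c "" = "" := by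
  intro target
  induction target with
  | nil => intro d h c; exact h c
  | cons a ts ih =>
    intro d h c
    rw [List.foldl_cons]
    refine ih _ ?_ c
    intro c'
    rw [PySem.Dict.getD_insert]
    split <;> simp [h]

lemma init_last_seen (target : List String) (c : String) :
    (target.foldl (fun d c => d.insert c "") (PySem.Dict.empty : SDict)).getD c "" = "" := by
  exact init_aux target PySem.Dict.empty (fun c' => PySem.Dict.getD_empty c' "") c

-- ===== VERDICT (by name: the statement is the Claim_ definition above) =====
theorem fill_down_rows_spec : Claim_equal_fill_down_rows := by
  intro rows columns _
  unfold Spec_fill_down_rows fill_down_rows fill_down_rows_alt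
  match rows with
  | [] => rfl
  | r0 :: rest =>
    simp only
    rw [outer_fold _ _ [] [] _ (fun c _ => by simp [init_last_seen, lastVal])]
    rfl
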